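-- pv_equiv track=rewrite | github.com/d6ms/atcoder | py/abc/124/b.py | solve
-- ===== SOURCE A (Python) =====
-- def solve(N, H):
--     cnt = 0
--     for i in range(N):
--         if i == 0:
--             cnt += 1
--             continue
--         max_height = max(H[:i])
--         if max_height <= H[i]:
--             cnt += 1
--     return cnt
-- ===== SOURCE B (Python) =====
-- def solve(N, H):
--     # One pass with a running maximum instead of recomputing max(H[:i]) each step.
--     cnt = 0
--     mx = None
--     for h in H[:N]:
--         if mx is None or mx <= h:
--             cnt += 1
--             mx = h
--     return cnt
-- ===== Notes on version B (the rewrite author's own statement) =====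
-- stated objective: faster
-- what changed: Replaces the per-index recomputation of max(H[:i]) with a single pass over H[:N] that carries a running maximum and the count.
-- outside the precondition, e.g. on solve(-1, [1, 2]): A returns 0, B returns 1
import Mathlib
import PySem

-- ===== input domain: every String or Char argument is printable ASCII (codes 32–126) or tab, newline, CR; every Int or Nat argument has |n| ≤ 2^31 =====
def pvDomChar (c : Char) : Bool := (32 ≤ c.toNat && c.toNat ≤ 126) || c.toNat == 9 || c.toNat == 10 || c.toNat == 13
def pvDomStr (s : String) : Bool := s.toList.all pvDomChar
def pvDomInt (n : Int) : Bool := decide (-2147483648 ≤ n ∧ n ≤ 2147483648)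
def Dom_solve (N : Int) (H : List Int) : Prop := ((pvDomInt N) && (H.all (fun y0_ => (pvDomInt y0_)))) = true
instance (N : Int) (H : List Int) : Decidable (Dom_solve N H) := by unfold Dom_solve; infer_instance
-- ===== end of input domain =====

-- B replaces A's per-index recomputation of max(H[:i]) with one pass carrying a running maximum.


-- ===== PORT A =====
-- A: for i in range(N): i == 0 always counts; otherwise count iff max(H[:i]) <= H[i].
def solve (N : Int) (H : List Int) : Int :=
  (PySem.List.pyRange 0 N 1).foldl
    (fun cnt i =>
      if i = 0 then cnt + 1
      else
        match PySem.List.max? (PySem.List.slice H none (some i)) (fun x => x),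
              PySem.List.pyGet? H i with
        | some m, some h => if m ≤ h then cnt + 1 else cnt
        | _, _ => cnt)
    0

-- ===== PORT B =====
-- B: one pass over H[:N] carrying (count, running maximum; None before the first element).
def bstep (st : Int × Option Int) (h : Int) : Int × Option Int :=
  match st.2 with
  | none => (st.1 + 1, some h)
  | some m => if m ≤ h then (st.1 + 1, some h) else st

def solve_alt (N : Int) (H : List Int) : Int :=
  ((PySem.List.slice H none (some N)).foldl bstep (0, none)).1

-- ===== PRECONDITION & SPEC =====
-- Pre_ requires 0 ≤ N (a negative count is not a meaningful input; A's empty range accidentally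
-- returns 0 there while B's H[:N] slice wraps from the end) and N ≤ len(H), outside which A raises IndexError.
def Pre_solve (N : Int) (H : List Int) : Prop := 0 ≤ N ∧ N ≤ H.length
instance (N : Int) (H : List Int) : Decidable (Pre_solve N H) := by unfold Pre_solve; infer_instance
def pvWitness_solve : Int × List Int := (3, [2, 1, 3])

def Spec_solve (N : Int) (H : List Int) (out : Int) : Prop := out = solve_alt N H
instance (N : Int) (H : List Int) (out : Int) : Decidable (Spec_solve N H out) := by unfold Spec_solve; infer_instance

-- ===== CLAIM (what is proved, stated in full; the proofs are below) =====
def Claim_equal_solve : Prop := ∀ (N : Int) (H : List Int), Dom_solve N H → Pre_solve N H → Spec_solve N H (solve N H)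

-- ===== LEMMAS AND PROOFS =====

-- The invariant tying the two loops together: after n steps (n ≤ len H), B's fold carries
-- exactly A's count over range(n) together with the maximum of H.take n (none for n = 0).
theorem key_inv (H : List Int) (n : Nat) (hn : n ≤ H.length) :
    (H.take n).foldl bstep (0, none) =
      ((PySem.List.pyRange 0 (n : Int) 1).foldl
        (fun cnt i =>
          if i = 0 then cnt + 1
          else
            match PySem.List.max? (PySem.List.slice H none (some i)) (fun x => x),
                  PySem.List.pyGet? H i with
            | some m, some h => if m ≤ h then cnt + 1 else cnt
            | _, _ => cnt)
        0,
       match H.take n with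
       | [] => none
       | y :: t => some (t.foldl max y)) := by
  induction n with
  | zero => simp [PySem.List.pyRange]
  | succ n ih =>
    have hn' : n < H.length := by omega
    have htake : H.take (n+1) = H.take n ++ [H[n]] := by
      rw [List.take_add_one]; simp [List.getElem?_eq_getElem hn']
    have hrange : PySem.List.pyRange 0 ((n:Int)+1) 1 = PySem.List.pyRange 0 (n:Int) 1 ++ [(n:Int)] :=
      PySem.List.pyRange_one_succ_right (by positivity)
    rw [htake, List.foldl_append, ih (by omega)]
    push_cast
    rw [hrange, List.foldl_append]
    rcases Nat.eq_zero_or_pos n with h0 | hpos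
    · subst h0
      rcases H with _ | ⟨y, t⟩
      · simp at hn'
      · simp [bstep, List.foldl]
    · have hne : H.take n ≠ [] := by
        intro h
        have hlen := congrArg List.length h
        simp only [List.length_take, List.length_nil] at hlen
        omega
      rcases htn : H.take n with _ | ⟨y, t⟩
      · exact absurd htn hne
      have hslice : PySem.List.slice H none (some (n:Int)) = y :: t := by
        rw [PySem.List.slice_to_natCast, htn]
      have hget : PySem.List.pyGet? H (n:Int) = some H[n] := by
        rw [PySem.List.pyGet?_natCast]; simp [List.getElem?_eq_getElem hn']
      have hi0 : ((n:Int) = 0) = False := by simp; omega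
      simp only [List.foldl, bstep, hslice, PySem.List.max?_id_cons, hget, hi0, if_false]
      by_cases hle : t.foldl max y ≤ H[n]
      · simp [hle, List.foldl_append]
      · simp [hle, List.foldl_append, max_eq_left (le_of_not_ge hle)]

theorem solve_eq_alt (N : Int) (H : List Int) (h0 : 0 ≤ N) (h1 : N ≤ H.length) :
    solve N H = solve_alt N H := by
  obtain ⟨n, rfl⟩ := Int.eq_ofNat_of_zero_le h0
  have hn : n ≤ H.length := by exact_mod_cast h1
  unfold solve solve_alt
  rw [PySem.List.slice_to_natCast, key_inv H n hn]

-- ===== VERDICT (by name: the statement is the Claim_ definition above) =====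
theorem solve_spec : Claim_equal_solve := by
  intro N H _ hpre
  exact solve_eq_alt N H hpre.1 hpre.2
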